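-- pv_equiv track=rewrite | github.com/pk10534/ScrabbleScorer | Assignment 1 - Scrabble Scorer/scrabble_scorer.py | vowel_bonus_scorer
-- ===== SOURCE A (Python) =====
-- def vowel_bonus_scorer(word):
--     word = word.upper()
--     letterpoints = ""
--     num_vowels = 0
--     num_consanants = 0
--
--     for char in word:
--         if char in 'AEIOU':
--             num_vowels += 1
--     vowel_points = num_vowels * 3
--     for char in word:
--         if char not in 'AEIOU':
--             num_consanants +=1
--
--     total_points = vowel_points + num_consanants
--     letterpoints = 'Points for {word}: {total_points}\n'.format(word = word, total_points = total_points)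
--
--
--     return letterpoints
-- ===== SOURCE B (Python) =====
-- _LETTER_POINTS = dict.fromkeys('AEIOU', 3)
--
-- def _letter_points(ch):
--     return _LETTER_POINTS.get(ch, 1)
--
-- def vowel_bonus_scorer(word):
--     word = word.upper()
--     total_points = sum(map(_letter_points, word))
--     return 'Points for {}: {}\n'.format(word, total_points)
-- ===== Notes on version B (the rewrite author's own statement) =====
-- stated objective: alternative
-- what changed: B scores each letter directly from a point table (3 for a vowel, 1 otherwise) and sums those weights in one pass; A counts vowels and consonants in two separate scans and combines the counts arithmetically (vowels*3 + consonants).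
import Mathlib
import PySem

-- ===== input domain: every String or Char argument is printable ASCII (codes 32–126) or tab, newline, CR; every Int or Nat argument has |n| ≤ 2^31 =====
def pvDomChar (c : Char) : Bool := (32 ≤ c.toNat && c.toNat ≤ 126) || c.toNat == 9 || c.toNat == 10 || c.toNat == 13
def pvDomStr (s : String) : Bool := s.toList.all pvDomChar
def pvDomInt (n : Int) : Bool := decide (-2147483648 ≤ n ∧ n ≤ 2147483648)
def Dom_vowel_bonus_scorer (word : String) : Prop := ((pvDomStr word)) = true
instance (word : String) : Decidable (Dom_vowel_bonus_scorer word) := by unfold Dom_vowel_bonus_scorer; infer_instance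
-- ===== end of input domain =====

-- ===== PORT A =====
-- B scores each letter from a point table (vowel ↦ 3, otherwise 1) and sums in one pass;
-- A counts vowels and consonants in two scans and combines the counts. Same output string.
def vowel_bonus_scorer (word : String) : String :=
  let w := PySem.Str.upper word
  let num_vowels : Int :=
    w.toList.foldl (fun acc c => if ("AEIOU".toList.contains c) then acc + 1 else acc) 0
  let vowel_points := num_vowels * 3
  let num_consanants : Int :=
    w.toList.foldl (fun acc c => if !("AEIOU".toList.contains c) then acc + 1 else acc) 0
  let total_points := vowel_points + num_consanants
  "Points for " ++ w ++ ": " ++ PySem.Int.toStr total_points ++ "\n"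

-- ===== PORT B =====
-- _LETTER_POINTS = dict.fromkeys('AEIOU', 3)
def LETTER_POINTS : PySem.Dict Char Int :=
  PySem.Dict.ofList ("AEIOU".toList.map (fun c => (c, 3)))

-- def _letter_points(ch): return _LETTER_POINTS.get(ch, 1)
def letter_points (ch : Char) : Int := LETTER_POINTS.getD ch 1

def vowel_bonus_scorer_alt (word : String) : String :=
  let w := PySem.Str.upper word
  let total_points : Int := (w.toList.map letter_points).sum
  "Points for " ++ w ++ ": " ++ PySem.Int.toStr total_points ++ "\n"

-- ===== PRECONDITION & SPEC =====
def Spec_vowel_bonus_scorer (word : String) (out : String) : Prop := out = vowel_bonus_scorer_alt word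
instance (word : String) (out : String) : Decidable (Spec_vowel_bonus_scorer word out) := by unfold Spec_vowel_bonus_scorer; infer_instance

-- ===== CLAIM (what is proved, stated in full; the proofs are below) =====
def Claim_equal_vowel_bonus_scorer : Prop := ∀ (word : String), Dom_vowel_bonus_scorer word → Spec_vowel_bonus_scorer word (vowel_bonus_scorer word)

-- ===== LEMMAS AND PROOFS =====
-- the point table agrees with a vowel-membership test
theorem letter_points_eq (c : Char) :
    letter_points c = if "AEIOU".toList.contains c then 3 else 1 := by
  have hd : LETTER_POINTS = PySem.Dict.mk [('A',3),('E',3),('I',3),('O',3),('U',3)] := by decide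
  by_cases h : c ∈ "AEIOU".toList
  · have hc : "AEIOU".toList.contains c = true := by simpa using h
    rw [hc, if_pos rfl]
    rcases (by simpa using h : c = 'A' ∨ c = 'E' ∨ c = 'I' ∨ c = 'O' ∨ c = 'U')
      with h|h|h|h|h <;> subst h <;> decide
  · have hc : "AEIOU".toList.contains c = false := by simpa using h
    rw [hc]
    simp only [Bool.false_eq_true, if_false]
    have h5 : ¬ c = 'A' ∧ ¬ c = 'E' ∧ ¬ c = 'I' ∧ ¬ c = 'O' ∧ ¬ c = 'U' := by
      simpa [not_or] using h
    obtain ⟨hA, hE, hI, hO, hU⟩ := h5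
    simp [letter_points, hd, PySem.Dict.getD, PySem.Dict.get?,
      Ne.symm hA, Ne.symm hE, Ne.symm hI, Ne.symm hO, Ne.symm hU]

-- summing per-letter weights = 3·(vowel count) + (non-vowel count)
theorem sum_weights (l : List Char) :
    (l.map letter_points).sum
      = 3 * (l.countP (fun c => "AEIOU".toList.contains c) : Int)
        + (l.countP (fun c => !("AEIOU".toList.contains c)) : Int) := by
  induction l with
  | nil => simp
  | cons a t ih =>
    simp only [List.map_cons, List.sum_cons, List.countP_cons, letter_points_eq, ih]
    by_cases h : ("AEIOU".toList.contains a) = true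
      <;> simp only [h, Bool.not_true, Bool.not_false, if_true, if_false]
      <;> push_cast <;> ring

-- ===== VERDICT (by name: the statement is the Claim_ definition above) =====
theorem vowel_bonus_scorer_spec : Claim_equal_vowel_bonus_scorer := by
  intro word _
  unfold Spec_vowel_bonus_scorer vowel_bonus_scorer vowel_bonus_scorer_alt
  simp only [PySem.List.foldl_if_add_one, sum_weights]
  have key : ∀ (a b : Int), a = b →
      ("Points for " ++ PySem.Str.upper word ++ ": " ++ PySem.Int.toStr a ++ "\n" : String)
        = "Points for " ++ PySem.Str.upper word ++ ": " ++ PySem.Int.toStr b ++ "\n" := by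
    intro a b hab; rw [hab]
  apply key
  ring
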